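-- pv_equiv track=rewrite | github.com/tokygava/konfa_new_2_v7 | src/depviz/parser.py | _split_name_spec_fallback
-- ===== SOURCE A (Python) =====
-- _COMPARATORS = ['===', '==', '!=', '>=', '<=', '>', '<', '~=']
--
-- def _split_name_spec_fallback(s: str):
--     idx = len(s)
--     for comp in _COMPARATORS:
--         pos = s.find(comp)
--         if pos != -1:
--             idx = min(idx, pos)
--     name = s[:idx].strip().rstrip(',')
--     spec = s[idx:].strip() or None
--     if spec and ';' in spec:
--         spec, _marker = spec.split(';', 1)
--         spec = spec.strip()
--     if '[' in name and ']' in name: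
--         base = name[:name.index('[')]
--         name = base.strip()
--     return name, spec
-- ===== SOURCE B (Python) =====
-- def _split_name_spec_fallback(s: str):
--     # Single left-to-right character-class scan: a version spec starts at the
--     # first position holding '<' or '>', or '=', '!' or '~' immediately
--     # followed by '=' (this covers exactly ===, ==, !=, >=, <=, >, <, ~=).
--     idx = next((i for i, ch in enumerate(s)
--                 if ch in '<>' or (ch in '=!~' and s[i + 1:i + 2] == '=')),
--                len(s))
--     name = s[:idx].strip().rstrip(',')
--     rest = s[idx:].strip()
--     spec = (None if not rest
--             else rest.split(';', 1)[0].strip() if ';' in rest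
--             else rest)
--     if ']' in name:
--         base, sep, _ = name.partition('[')
--         if sep:
--             name = base.strip()
--     return name, spec
-- ===== Notes on version B (the rewrite author's own statement) =====
-- stated objective: alternative
-- what changed: The comparator position is found by a single left-to-right character-class scan (first index holding '<', '>', or '=', '!', '~' followed by '='), instead of A's eight substring searches combined by min; the name's extras are stripped via partition and the spec is built by one conditional expression instead of reassignment.
import Mathlib
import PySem

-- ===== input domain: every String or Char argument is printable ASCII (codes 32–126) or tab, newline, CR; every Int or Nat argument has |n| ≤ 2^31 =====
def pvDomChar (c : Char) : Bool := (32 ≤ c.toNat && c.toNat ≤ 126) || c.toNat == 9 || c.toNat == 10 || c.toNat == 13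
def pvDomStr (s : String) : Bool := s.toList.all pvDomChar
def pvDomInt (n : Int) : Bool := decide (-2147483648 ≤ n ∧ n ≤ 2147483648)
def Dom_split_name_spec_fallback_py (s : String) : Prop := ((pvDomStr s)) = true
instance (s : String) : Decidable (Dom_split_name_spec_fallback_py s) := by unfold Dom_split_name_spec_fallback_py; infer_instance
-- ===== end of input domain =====

-- B replaces A's eight substring searches (find per comparator, min of hits) by one
-- left-to-right character-class scan for the first comparator start (objective: alternative).

-- ===== PORT A =====
def pvComparators : List (List Char) :=
  [['=', '=', '='], ['=', '='], ['!', '='], ['>', '='], ['<', '='], ['>'], ['<'], ['~', '=']]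

-- loop body of A's 'for comp in _COMPARATORS'
def pvStep (cs : List Char) (idx : Int) (comp : List Char) : Int :=
  let pos := PySem.Chars.find cs comp
  if pos ≠ -1 then min idx pos else idx

-- idx = len(s); for comp in _COMPARATORS: pos = s.find(comp); if pos != -1: idx = min(idx, pos)
def pvIdxA (cs : List Char) : Int := List.foldl (pvStep cs) (cs.length : Int) pvComparators

-- exact port of s.rstrip(','): drop the trailing commas
def pvRstripComma (cs : List Char) : List Char := (cs.reverse.dropWhile (· == ',')).reverse

def split_name_spec_fallback_py (s : String) : String × Option String :=
  let cs := s.toList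
  let idx := pvIdxA cs
  let name := pvRstripComma (PySem.Chars.strip (PySem.List.slice cs none (some idx)))
  let spec0 := PySem.Chars.strip (PySem.List.slice cs (some idx) none)
  -- 'spec = s[idx:].strip() or None'
  let spec : Option (List Char) := if spec0 = [] then none else some spec0
  -- 'if spec and ';' in spec: spec, _marker = spec.split(';', 1); spec = spec.strip()'
  -- (the unpack takes the first piece; ';' ∈ spec guarantees two pieces, headD is exact here)
  let spec : Option (List Char) :=
    match spec with
    | none => none
    | some sp =>
      if PySem.Chars.isIn [';'] sp then
        some (PySem.Chars.strip ((PySem.Chars.splitOnMax sp [';'] 1).headD []))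
      else some sp
  -- "if '[' in name and ']' in name: name = name[:name.index('[')].strip()"
  -- (name.index('[') = Chars.find, exact under the guard '[' in name)
  let name :=
    if PySem.Chars.isIn ['['] name && PySem.Chars.isIn [']'] name then
      PySem.Chars.strip (PySem.List.slice name none (some (PySem.Chars.find name ['['])))
    else name
  (String.ofList name, spec.map String.ofList)

-- ===== PORT B =====
-- idx = next((i for i, ch in enumerate(s) if ch in '<>' or (ch in '=!~' and s[i+1:i+2] == '=')), len(s))
def pvScanB : List Char → Nat
  | [] => 0
  | c :: rest =>
    if c = '<' ∨ c = '>' then 0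
    else if (c = '=' ∨ c = '!' ∨ c = '~') ∧ rest.head? = some '=' then 0
    else pvScanB rest + 1

def split_name_spec_fallback_py_alt (s : String) : String × Option String :=
  let cs := s.toList
  let idx := pvScanB cs
  let name := pvRstripComma (PySem.Chars.strip (cs.take idx))
  let rest := PySem.Chars.strip (cs.drop idx)
  -- spec = None if not rest else rest.split(';', 1)[0].strip() if ';' in rest else rest
  let spec : Option (List Char) :=
    if rest = [] then none
    else if PySem.Chars.isIn [';'] rest then
      some (PySem.Chars.strip ((PySem.Chars.splitOnMax rest [';'] 1).headD []))
    else some rest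
  -- if ']' in name: base, sep, _ = name.partition('['); if sep: name = base.strip()
  -- (partition's base = chars before the first '[' = takeWhile (· != '['); sep nonempty iff '[' in name)
  let name :=
    if PySem.Chars.isIn [']'] name then
      if PySem.Chars.isIn ['['] name then
        PySem.Chars.strip (name.takeWhile (· != '['))
      else name
    else name
  (String.ofList name, spec.map String.ofList)

-- ===== PRECONDITION & SPEC =====
def Spec_split_name_spec_fallback_py (s : String) (out : String × Option String) : Prop := out = split_name_spec_fallback_py_alt s
instance (s : String) (out : String × Option String) : Decidable (Spec_split_name_spec_fallback_py s out) := by unfold Spec_split_name_spec_fallback_py; infer_instance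

-- ===== CLAIM (what is proved, stated in full; the proofs are below) =====
def Claim_equal_split_name_spec_fallback_py : Prop := ∀ (s : String), Dom_split_name_spec_fallback_py s → Spec_split_name_spec_fallback_py s (split_name_spec_fallback_py s)

-- ===== LEMMAS AND PROOFS =====

-- 'some comparator starts at the head of l'
def pvHit (l : List Char) : Prop := ∃ comp ∈ pvComparators, comp <+: l

lemma pv_singleton_prefix_iff {c : Char} {l : List Char} : [c] <+: l ↔ l.head? = some c := by
  cases l with
  | nil => simp
  | cons d t => simp [List.cons_prefix_cons, eq_comm]

lemma pvHit_cons (c : Char) (rest : List Char) :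
    pvHit (c :: rest) ↔
      (c = '<' ∨ c = '>') ∨ ((c = '=' ∨ c = '!' ∨ c = '~') ∧ rest.head? = some '=') := by
  constructor
  · rintro ⟨comp, hm, hp⟩
    simp [pvComparators] at hm
    rcases hm with rfl | rfl | rfl | rfl | rfl | rfl | rfl | rfl <;>
      cases rest <;> simp_all [List.cons_prefix_cons] <;> tauto
  · rintro (h | ⟨hc, hh⟩)
    · rcases h with rfl | rfl
      · exact ⟨['<'], by simp [pvComparators], by simp⟩
      · exact ⟨['>'], by simp [pvComparators], by simp⟩
    · cases rest with
      | nil => simp at hh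
      | cons e t =>
        simp at hh
        subst hh
        rcases hc with rfl | rfl | rfl
        · exact ⟨['=', '='], by simp [pvComparators], by simp [List.cons_prefix_cons]⟩
        · exact ⟨['!', '='], by simp [pvComparators], by simp [List.cons_prefix_cons]⟩
        · exact ⟨['~', '='], by simp [pvComparators], by simp [List.cons_prefix_cons]⟩

lemma pvStep_le (cs : List Char) (acc : Int) (comp : List Char) : pvStep cs acc comp ≤ acc := by
  unfold pvStep
  dsimp only
  split_ifs
  · exact min_le_left _ _
  · exact le_refl _

lemma pvFold_le (cs : List Char) (l : List (List Char)) :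
    ∀ acc : Int, List.foldl (pvStep cs) acc l ≤ acc := by
  induction l with
  | nil => intro acc; simp
  | cons c l ih =>
    intro acc
    calc List.foldl (pvStep cs) acc (c :: l) = List.foldl (pvStep cs) (pvStep cs acc c) l := by simp
    _ ≤ pvStep cs acc c := ih _
    _ ≤ acc := pvStep_le cs acc c

lemma pvFold_le_find (cs : List Char) (l : List (List Char)) :
    ∀ (acc : Int) (comp : List Char), comp ∈ l → PySem.Chars.find cs comp ≠ -1 →
      List.foldl (pvStep cs) acc l ≤ PySem.Chars.find cs comp := by
  induction l with
  | nil => intro acc comp h; simp at h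
  | cons c l ih =>
    intro acc comp hm hf
    rcases List.mem_cons.mp hm with rfl | hm
    · calc List.foldl (pvStep cs) acc (comp :: l)
          = List.foldl (pvStep cs) (pvStep cs acc comp) l := by simp
      _ ≤ pvStep cs acc comp := pvFold_le cs l _
      _ ≤ PySem.Chars.find cs comp := by unfold pvStep; dsimp only; rw [if_pos hf]; exact min_le_right _ _
    · calc List.foldl (pvStep cs) acc (c :: l)
          = List.foldl (pvStep cs) (pvStep cs acc c) l := by simp
      _ ≤ PySem.Chars.find cs comp := ih _ comp hm hf

lemma pvFold_cases (cs : List Char) (l : List (List Char)) :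
    ∀ acc : Int, List.foldl (pvStep cs) acc l = acc ∨
      ∃ comp ∈ l, List.foldl (pvStep cs) acc l = PySem.Chars.find cs comp ∧
        PySem.Chars.find cs comp ≠ -1 := by
  induction l with
  | nil => intro acc; left; simp
  | cons c l ih =>
    intro acc
    have hstep : List.foldl (pvStep cs) acc (c :: l) = List.foldl (pvStep cs) (pvStep cs acc c) l := by simp
    rcases ih (pvStep cs acc c) with h | ⟨comp, hm, heq, hne⟩
    · rw [hstep, h]
      unfold pvStep
      dsimp only
      split_ifs with hf
      · rcases le_total acc (PySem.Chars.find cs c) with hle | hle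
        · left; exact min_eq_left hle
        · right; exact ⟨c, List.mem_cons_self .., min_eq_right hle, hf⟩
      · left; rfl
    · right; exact ⟨comp, List.mem_cons_of_mem _ hm, hstep ▸ heq, hne⟩

lemma pvIdxA_nonneg (cs : List Char) : 0 ≤ pvIdxA cs := by
  rcases pvFold_cases cs pvComparators ((cs.length : Int)) with h | ⟨comp, _, heq, hne⟩
  · unfold pvIdxA; rw [h]; exact Int.natCast_nonneg _
  · unfold pvIdxA; rw [heq]
    exact (PySem.Chars.find_nonneg_iff _ _).mpr ((PySem.Chars.find_ne_neg_one_iff _ _).mp hne)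

lemma pvIdxA_le (cs : List Char) : pvIdxA cs ≤ (cs.length : Int) := pvFold_le cs pvComparators _

lemma pvIdxA_not_hit (cs : List Char) (n : Nat) (hn : (n : Int) < pvIdxA cs) :
    ¬ pvHit (cs.drop n) := by
  rintro ⟨comp, hm, hp⟩
  have hin : PySem.Chars.isIn comp cs = true :=
    (PySem.Chars.exists_prefix_drop_iff_isIn comp cs).mp ⟨n, hp⟩
  have hinf := (PySem.Chars.isIn_iff_infix comp cs).mp hin
  have h0 : 0 ≤ PySem.Chars.find cs comp := (PySem.Chars.find_nonneg_iff _ _).mpr hinf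
  obtain ⟨_, hmin⟩ := PySem.Chars.find_spec h0
  have hle : (PySem.Chars.find cs comp).toNat ≤ n := by
    by_contra hlt
    exact hmin n (by omega) hp
  have hfold : pvIdxA cs ≤ PySem.Chars.find cs comp :=
    pvFold_le_find cs pvComparators _ comp hm (by omega)
  omega

lemma pvIdxA_hit (cs : List Char) (h : pvIdxA cs < (cs.length : Int)) :
    pvHit (cs.drop (pvIdxA cs).toNat) := by
  rcases pvFold_cases cs pvComparators ((cs.length : Int)) with heq | ⟨comp, hm, heq, hne⟩
  · exfalso; unfold pvIdxA at h; omega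
  · have heq' : pvIdxA cs = PySem.Chars.find cs comp := heq
    have h0 : 0 ≤ PySem.Chars.find cs comp :=
      (PySem.Chars.find_nonneg_iff _ _).mpr ((PySem.Chars.find_ne_neg_one_iff _ _).mp hne)
    obtain ⟨hpre, _⟩ := PySem.Chars.find_spec h0
    exact ⟨comp, hm, heq' ▸ hpre⟩

lemma pvScanB_le (cs : List Char) : pvScanB cs ≤ cs.length := by
  induction cs with
  | nil => simp [pvScanB]
  | cons c rest ih =>
    simp only [pvScanB, List.length_cons]
    split_ifs <;> omega

lemma pvScanB_not_hit (cs : List Char) : ∀ n, n < pvScanB cs → ¬ pvHit (cs.drop n) := by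
  induction cs with
  | nil => intro n hn; simp [pvScanB] at hn
  | cons c rest ih =>
    intro n hn
    simp only [pvScanB] at hn
    split_ifs at hn with h1 h2
    · omega
    · omega
    · cases n with
      | zero =>
        intro hhit
        rcases (pvHit_cons c rest).mp hhit with h | h
        · exact h1 h
        · exact h2 h
      | succ n =>
        simpa using ih n (by omega)

lemma pvScanB_hit (cs : List Char) (h : pvScanB cs < cs.length) :
    pvHit (cs.drop (pvScanB cs)) := by
  induction cs with
  | nil => simp [pvScanB] at h
  | cons c rest ih =>
    simp only [pvScanB] at h ⊢
    split_ifs at h ⊢ with h1 h2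
    · exact (pvHit_cons c rest).mpr (Or.inl h1)
    · exact (pvHit_cons c rest).mpr (Or.inr h2)
    · simp only [List.length_cons] at h
      simpa using ih (by omega)

lemma pvIdx_eq (cs : List Char) : pvIdxA cs = (pvScanB cs : Int) := by
  have h0 := pvIdxA_nonneg cs
  have hle := pvIdxA_le cs
  have hble := pvScanB_le cs
  rcases Nat.lt_trichotomy (pvIdxA cs).toNat (pvScanB cs) with hlt | heq | hlt
  · exfalso
    have hlen : pvIdxA cs < (cs.length : Int) := by omega
    exact pvScanB_not_hit cs _ hlt (pvIdxA_hit cs hlen)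
  · omega
  · exfalso
    have hlen : pvScanB cs < cs.length := by omega
    exact pvIdxA_not_hit cs (pvScanB cs) (by omega) (pvScanB_hit cs hlen)

lemma pvTakeWhileAux (cs : List Char) : ∀ (k : Nat) (c : Char), cs[k]? = some c →
    (∀ i, i < k → cs[i]? ≠ some c) → cs.takeWhile (· != c) = cs.take k := by
  induction cs with
  | nil => intro k c h; simp at h
  | cons d t ih =>
    intro k c hk hlt
    cases k with
    | zero =>
      simp only [List.getElem?_cons_zero, Option.some.injEq] at hk
      subst hk
      simp
    | succ k =>
      have hd : d ≠ c := by
        have := hlt 0 (Nat.succ_pos _)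
        simpa using this
      simp only [List.takeWhile_cons, bne_iff_ne, ne_eq, hd, not_false_eq_true, if_true,
        List.take_succ_cons, List.cons.injEq, true_and]
      exact ih k c (by simpa using hk)
        (fun i hi => by have := hlt (i + 1) (by omega); simpa using this)

lemma pvTakeFind (cs : List Char) (c : Char) (h : PySem.Chars.isIn [c] cs = true) :
    cs.take (PySem.Chars.find cs [c]).toNat = cs.takeWhile (· != c) := by
  have hinf := (PySem.Chars.isIn_iff_infix _ _).mp h
  have h0 : 0 ≤ PySem.Chars.find cs [c] := (PySem.Chars.find_nonneg_iff _ _).mpr hinf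
  obtain ⟨hpre, hmin⟩ := PySem.Chars.find_spec h0
  have hk : cs[(PySem.Chars.find cs [c]).toNat]? = some c := by
    rw [← List.head?_drop]
    exact pv_singleton_prefix_iff.mp hpre
  have hl : ∀ i, i < (PySem.Chars.find cs [c]).toNat → cs[i]? ≠ some c := by
    intro i hi hc
    exact hmin i hi (pv_singleton_prefix_iff.mpr (by rw [List.head?_drop]; exact hc))
  exact (pvTakeWhileAux cs _ c hk hl).symm

lemma pvName_eq (name : List Char) :
    (if PySem.Chars.isIn ['['] name && PySem.Chars.isIn [']'] name then
      PySem.Chars.strip (PySem.List.slice name none (some (PySem.Chars.find name ['['])))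
    else name) =
    (if PySem.Chars.isIn [']'] name then
      if PySem.Chars.isIn ['['] name then
        PySem.Chars.strip (name.takeWhile (· != '['))
      else name
    else name) := by
  by_cases hL : PySem.Chars.isIn ['['] name = true
  · by_cases hR : PySem.Chars.isIn [']'] name = true
    · have h0 : 0 ≤ PySem.Chars.find name ['['] :=
        (PySem.Chars.find_nonneg_iff _ _).mpr ((PySem.Chars.isIn_iff_infix _ _).mp hL)
      rw [← pvTakeFind name '[' hL, ← PySem.List.slice_to (xs := name) h0]
      simp [hL, hR]
    · simp [hL, hR]
  · by_cases hR : PySem.Chars.isIn [']'] name = true <;> simp [hL, hR]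

-- ===== VERDICT (by name: the statement is the Claim_ definition above) =====
theorem split_name_spec_fallback_py_spec : Claim_equal_split_name_spec_fallback_py := by
  intro s _
  unfold Spec_split_name_spec_fallback_py
  show split_name_spec_fallback_py s = split_name_spec_fallback_py_alt s
  have hidx := pvIdx_eq s.toList
  simp only [split_name_spec_fallback_py, split_name_spec_fallback_py_alt, hidx,
    PySem.List.slice_to_natCast, PySem.List.slice_from_natCast]
  refine congrArg₂ Prod.mk ?_ ?_
  · exact congrArg String.ofList (pvName_eq _)
  · by_cases hrest : PySem.Chars.strip (s.toList.drop (pvScanB s.toList)) = [] <;>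
      simp [hrest]
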